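-- pv_equiv track=rewrite | github.com/ponir-techlogicians/lovecompatability | app/utils.py | adjacency_sum_steps_fixed_3
-- ===== SOURCE A (Python) =====
-- def adjacency_sum_steps_fixed_3(arr: list) -> list:
--     """Return 5 steps of adjacency summing (even if 2 elements reached early)."""
--     steps = [arr[:]]
--     while len(steps) < 3:
--         if len(arr) <= 2:
--             steps.append(arr[:])
--         else:
--             arr = [(arr[i] + arr[i + 1]) % 10 for i in range(len(arr) - 1)]
--             steps.append(arr[:])
--     return steps
-- ===== SOURCE B (Python) =====
-- def adjacency_sum_steps_fixed_3(arr: list) -> list: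
--     """Return 5 steps of adjacency summing (even if 2 elements reached early)."""
--     n = len(arr)
--     coeffs = [[1], [1, 1], [1, 2, 1]]
--     steps = []
--     for k in range(3):
--         r = min(k, max(0, n - 2))
--         if r == 0:
--             steps.append(arr[:])
--         else:
--             steps.append([sum(c * arr[i + j] for j, c in enumerate(coeffs[r])) % 10
--                           for i in range(n - r)])
--     return steps
-- ===== Notes on version B (the rewrite author's own statement) =====
-- stated objective: alternative
-- what changed: Instead of iteratively rewriting the array in a while-loop, B computes each of the three snapshots directly from the original array via closed-form binomial window sums ((arr[i]+arr[i+1])%10 and (arr[i]+2*arr[i+1]+arr[i+2])%10), with the effective reduction count r = min(k, max(0, n-2)) reproducing the len<=2 stopping guard.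
import Mathlib
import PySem

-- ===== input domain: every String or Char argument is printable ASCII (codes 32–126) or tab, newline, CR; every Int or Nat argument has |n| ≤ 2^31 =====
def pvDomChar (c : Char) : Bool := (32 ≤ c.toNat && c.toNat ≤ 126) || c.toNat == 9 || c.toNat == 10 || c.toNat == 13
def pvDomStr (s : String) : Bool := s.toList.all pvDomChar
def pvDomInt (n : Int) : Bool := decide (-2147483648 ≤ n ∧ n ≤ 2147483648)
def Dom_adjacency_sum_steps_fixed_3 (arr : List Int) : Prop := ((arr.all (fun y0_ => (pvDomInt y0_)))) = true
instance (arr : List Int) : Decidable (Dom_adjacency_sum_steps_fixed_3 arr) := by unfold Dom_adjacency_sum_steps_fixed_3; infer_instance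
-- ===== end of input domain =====

-- B replaces A's destructive while-loop of repeated adjacency passes by computing each of the
-- three snapshots directly from the original array via binomial window sums (objective: alternative).


-- ===== PORT A =====
-- one adjacency pass: [(arr[i] + arr[i+1]) % 10 for i in range(len(arr) - 1)]
-- (indices are always in range, so List.getD is exact here)
def pvStepA (arr : List Int) : List Int :=
  (List.range (arr.length - 1)).map
    (fun i => PySem.Int.mod (arr.getD i 0 + arr.getD (i + 1) 0) 10)

-- while len(steps) < 3: the loop appends exactly one snapshot per iteration, so it
-- runs 3 - len(steps) more times; transliterated as recursion on that count
def pvLoopA : Nat → List Int → List (List Int) → List (List Int)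
  | 0, _, steps => steps
  | k + 1, arr, steps =>
    if arr.length ≤ 2 then
      pvLoopA k arr (steps ++ [arr])
    else
      let arr' := pvStepA arr
      pvLoopA k arr' (steps ++ [arr'])

def adjacency_sum_steps_fixed_3 (arr : List Int) : List (List Int) :=
  pvLoopA 2 arr [arr]

-- ===== PORT B =====
def pvCoeffsB : List (List Int) := [[1], [1, 1], [1, 2, 1]]

-- one snapshot: r-fold reduction computed directly from arr by binomial window sums
def pvSnapB (arr : List Int) (r : Nat) : List Int :=
  if r = 0 then arr
  else
    (List.range (arr.length - r)).map (fun i =>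
      PySem.Int.mod
        (((pvCoeffsB.getD r []).zipIdx).foldl (fun s cj => s + cj.1 * arr.getD (i + cj.2) 0) 0)
        10)

-- r = min(k, max(0, n - 2)); Nat subtraction n - 2 is exactly Python's max(0, n - 2)
def adjacency_sum_steps_fixed_3_alt (arr : List Int) : List (List Int) :=
  (List.range 3).map (fun k => pvSnapB arr (min k (arr.length - 2)))

-- ===== PRECONDITION & SPEC =====
def Spec_adjacency_sum_steps_fixed_3 (arr : List Int) (out : List (List Int)) : Prop := out = adjacency_sum_steps_fixed_3_alt arr
instance (arr : List Int) (out : List (List Int)) : Decidable (Spec_adjacency_sum_steps_fixed_3 arr out) := by unfold Spec_adjacency_sum_steps_fixed_3; infer_instance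

-- ===== CLAIM (what is proved, stated in full; the proofs are below) =====
def Claim_equal_adjacency_sum_steps_fixed_3 : Prop := ∀ (arr : List Int), Dom_adjacency_sum_steps_fixed_3 arr → Spec_adjacency_sum_steps_fixed_3 arr (adjacency_sum_steps_fixed_3 arr)

-- ===== LEMMAS AND PROOFS =====

theorem pvStepA_length (arr : List Int) : (pvStepA arr).length = arr.length - 1 := by
  simp [pvStepA]

-- snapshot r = 1 is exactly one adjacency pass
theorem pvSnapB_one (arr : List Int) : pvSnapB arr 1 = pvStepA arr := by
  unfold pvSnapB pvStepA pvCoeffsB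
  rw [if_neg Nat.one_ne_zero]
  apply List.map_congr_left
  intro i _
  norm_num [List.zipIdx_cons]

-- snapshot r = 2 is exactly two adjacency passes
theorem pvSnapB_two (arr : List Int) : pvSnapB arr 2 = pvStepA (pvStepA arr) := by
  unfold pvSnapB
  rw [if_neg (by decide : (2:Nat) ≠ 0)]
  conv_rhs => rw [pvStepA]
  rw [pvStepA_length]
  have hlen : arr.length - 1 - 1 = arr.length - 2 := by omega
  rw [hlen]
  apply List.map_congr_left
  intro i hi
  rw [List.mem_range] at hi
  have h1 : (pvStepA arr).getD i 0 =
      PySem.Int.mod (arr.getD i 0 + arr.getD (i + 1) 0) 10 := by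
    unfold pvStepA
    exact PySem.List.getD_map_range _ _ _ _ (by omega)
  have h2 : (pvStepA arr).getD (i + 1) 0 =
      PySem.Int.mod (arr.getD (i + 1) 0 + arr.getD (i + 2) 0) 10 := by
    unfold pvStepA
    have := PySem.List.getD_map_range
      (fun j => PySem.Int.mod (arr.getD j 0 + arr.getD (j + 1) 0) 10)
      (arr.length - 1) (i + 1) 0 (by omega)
    simpa using this
  rw [h1, h2]
  rw [show pvCoeffsB.getD 2 [] = [1, 2, 1] from rfl,
      show ([(1 : Int), 2, 1]).zipIdx = [(1, 0), (2, 1), (1, 2)] from rfl]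
  simp only [List.foldl_cons, List.foldl_nil, Nat.add_zero]
  rw [PySem.Int.mod_eq_emod_of_pos (by norm_num),
      PySem.Int.mod_eq_emod_of_pos (by norm_num),
      PySem.Int.mod_eq_emod_of_pos (by norm_num),
      PySem.Int.mod_eq_emod_of_pos (by norm_num)]
  omega

-- ===== VERDICT (by name: the statement is the Claim_ definition above) =====
theorem adjacency_sum_steps_fixed_3_spec : Claim_equal_adjacency_sum_steps_fixed_3 := by
  intro arr _
  show adjacency_sum_steps_fixed_3 arr = adjacency_sum_steps_fixed_3_alt arr
  unfold adjacency_sum_steps_fixed_3 adjacency_sum_steps_fixed_3_alt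
  simp only [show List.range 3 = [0, 1, 2] by decide, List.map_cons, List.map_nil]
  by_cases h2 : arr.length ≤ 2
  · have hr : arr.length - 2 = 0 := by omega
    simp [pvLoopA, h2, hr, pvSnapB]
  · have hr1 : min 1 (arr.length - 2) = 1 := by omega
    rw [hr1, pvSnapB_one]
    by_cases h3 : arr.length = 3
    · have hlen : (pvStepA arr).length ≤ 2 := by rw [pvStepA_length]; omega
      have hr2 : min 2 (arr.length - 2) = 1 := by omega
      rw [hr2, pvSnapB_one]
      simp [pvLoopA, h2, hlen, pvSnapB]
    · have hlen : ¬ (pvStepA arr).length ≤ 2 := by rw [pvStepA_length]; omega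
      have hr2 : min 2 (arr.length - 2) = 2 := by omega
      rw [hr2, pvSnapB_two]
      simp [pvLoopA, h2, hlen, pvSnapB]
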